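-- pv_equiv track=rewrite | github.com/ptjahjadi/Phased-Out | play_strategy.py | check_group3
-- ===== SOURCE A (Python) =====
-- def check_group3(group):
--     """ This function checks the validity of group 3 in the combination
--     of cards. This function acts similar to Q1 with less considerations and
--     only focusing in group 3 validity.
--     """
--     numberlist = []
--     num = 1
--     naturals = 0
--     for card in group:
--         if card[0] == "0":
--             numberlist.append("10")
--         elif card[0] == "J":
--             numberlist.append("11")
--         elif card[0] == "Q":
--             numberlist.append("12")
--         elif card[0] == "K":
--             numberlist.append("13")
--         else:
--             numberlist.append(card[0])
--     for natural_check in numberlist: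
--         if natural_check != "A":
--             naturals += 1
--     for natural_num in numberlist:
--         if natural_num != "A":
--             first_num = natural_num
--             break
--     for check_num in range(1, len(numberlist)):
--         try:
--             if (first_num == numberlist[check_num] or
--                     numberlist[check_num] == "A"):
--                     num += 1
--         except UnboundLocalError:
--             break
--     if num == 4 and naturals >= 2 and len(numberlist) == 4:
--         return True
--     else:
--         return False
-- ===== SOURCE B (Python) =====
-- def check_group3(group):
--     ranks = [{"0": "10", "J": "11", "Q": "12", "K": "13"}.get(card[0], card[0])
--              for card in group]
--     if len(ranks) != 4:
--         return False
--     non_a = [r for r in ranks if r != "A"]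
--     return len(non_a) >= 2 and len(set(non_a)) == 1
-- ===== Notes on version B (the rewrite author's own statement) =====
-- stated objective: simpler
-- what changed: A's four passes (rank mapping, non-A count, first-non-A scan with try/except, positional match loop over indices) are replaced by a rank map via dict.get plus a single test that the non-'A' ranks number at least 2 and form a one-element set.
import Mathlib
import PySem

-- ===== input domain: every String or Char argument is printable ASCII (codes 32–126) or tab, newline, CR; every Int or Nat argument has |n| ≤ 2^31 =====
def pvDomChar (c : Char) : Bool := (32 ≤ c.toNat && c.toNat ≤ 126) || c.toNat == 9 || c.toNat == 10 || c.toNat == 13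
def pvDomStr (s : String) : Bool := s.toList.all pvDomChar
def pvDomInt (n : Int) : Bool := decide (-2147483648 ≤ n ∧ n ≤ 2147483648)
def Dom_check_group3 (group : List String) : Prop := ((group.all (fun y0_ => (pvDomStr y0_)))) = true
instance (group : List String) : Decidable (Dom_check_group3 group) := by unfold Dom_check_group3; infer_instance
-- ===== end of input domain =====

-- B replaces A's four separate passes (count, first-non-A scan, positional match loop, final test)
-- by one rank map plus a single set-cardinality test on the non-'A' ranks (objective: simpler).

-- ===== PORT A =====
-- A's first loop body: map card[0] to its rank string ("" is unreachable: Pre_ excludes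
-- empty cards, on which Python raises IndexError at card[0]).
def pvRankA (card : String) : String :=
  match PySem.Str.pyGet? card 0 with
  | none => ""
  | some c =>
    if String.ofList [c] = "0" then "10"
    else if String.ofList [c] = "J" then "11"
    else if String.ofList [c] = "Q" then "12"
    else if String.ofList [c] = "K" then "13"
    else String.ofList [c]

def check_group3 (group : List String) : Bool :=
  let numberlist := group.foldl (fun acc card => acc ++ [pvRankA card]) []
  let naturals : Int := numberlist.foldl (fun n x => if x ≠ "A" then n + 1 else n) 0
  -- the for/break loop assigning first_num (none = first_num left unassigned)
  let first_num := numberlist.find? (fun x => x ≠ "A")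
  let num : Int :=
    match first_num with
    | none => 1   -- the UnboundLocalError is caught on the first iteration and the loop breaks
    | some f =>
      (PySem.List.pyRange 1 (numberlist.length : Int) 1).foldl
        (fun n i =>
          if f = PySem.List.pyGetD numberlist i "" ∨ PySem.List.pyGetD numberlist i "" = "A"
          then n + 1 else n) 1
  decide (num = 4 ∧ 2 ≤ naturals ∧ numberlist.length = 4)

-- ===== PORT B =====
def pvRankB (card : String) : String :=
  let c := match PySem.Str.pyGet? card 0 with
           | none => ""   -- unreachable under Pre_ (IndexError)
           | some ch => String.ofList [ch]
  PySem.Dict.getD (PySem.Dict.ofList [("0", "10"), ("J", "11"), ("Q", "12"), ("K", "13")]) c c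

def check_group3_alt (group : List String) : Bool :=
  let ranks := group.map pvRankB
  if ranks.length ≠ 4 then false
  else
    let nonA := ranks.filter (fun r => r ≠ "A")
    decide (2 ≤ nonA.length ∧ (PySem.Set.ofList nonA).length = 1)

-- ===== PRECONDITION & SPEC =====
-- Pre_ excludes groups containing an empty card string, on which Python's card[0] raises IndexError.
def Pre_check_group3 (group : List String) : Prop := ∀ card ∈ group, card ≠ ""
instance (group : List String) : Decidable (Pre_check_group3 group) := by
  unfold Pre_check_group3; infer_instance
def pvWitness_check_group3 : List String := ["3D", "3H", "AS", "3C"]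
def Spec_check_group3 (group : List String) (out : Bool) : Prop := out = check_group3_alt group
instance (group : List String) (out : Bool) : Decidable (Spec_check_group3 group out) := by
  unfold Spec_check_group3; infer_instance

-- ===== CLAIM (what is proved, stated in full; the proofs are below) =====
def Claim_equal_check_group3 : Prop := ∀ (group : List String), Dom_check_group3 group → Pre_check_group3 group → Spec_check_group3 group (check_group3 group)

-- ===== LEMMAS AND PROOFS =====
set_option maxRecDepth 4096

-- the two rank maps agree card by card
theorem rank_eq (card : String) : pvRankA card = pvRankB card := by
  unfold pvRankA pvRankB
  cases h : PySem.Str.pyGet? card 0 with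
  | none => simp; decide
  | some c =>
    simp only
    by_cases h0 : String.ofList [c] = "0"
    · rw [h0]; decide
    by_cases hj : String.ofList [c] = "J"
    · rw [hj]; decide
    by_cases hq : String.ofList [c] = "Q"
    · rw [hq]; decide
    by_cases hk : String.ofList [c] = "K"
    · rw [hk]; decide
    have d : (PySem.Dict.ofList [("0", "10"), ("J", "11"), ("Q", "12"), ("K", "13")] : PySem.Dict String String).items = [("0", "10"), ("J", "11"), ("Q", "12"), ("K", "13")] := by decide
    simp only [PySem.Dict.getD, PySem.Dict.get?, d, List.find?, if_neg h0, if_neg hj, if_neg hq, if_neg hk]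
    rw [show ("0" == String.ofList [c]) = false from beq_eq_false_iff_ne.mpr (fun h => h0 h.symm),
        show ("J" == String.ofList [c]) = false from beq_eq_false_iff_ne.mpr (fun h => hj h.symm),
        show ("Q" == String.ofList [c]) = false from beq_eq_false_iff_ne.mpr (fun h => hq h.symm),
        show ("K" == String.ofList [c]) = false from beq_eq_false_iff_ne.mpr (fun h => hk h.symm)]
    rfl

-- the bodies of A and of B agree on the common rank list rs
set_option maxHeartbeats 1000000 in
theorem main_eq (rs : List String) :
    (decide ((match rs.find? (fun x => x ≠ "A") with
      | none => (1 : Int)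
      | some f =>
        (PySem.List.pyRange 1 (rs.length : Int) 1).foldl
          (fun n i =>
            if f = PySem.List.pyGetD rs i "" ∨ PySem.List.pyGetD rs i "" = "A"
            then n + 1 else n) 1) = 4 ∧
      2 ≤ rs.foldl (fun n x => if x ≠ "A" then n + 1 else n) (0 : Int) ∧ rs.length = 4))
    = (if rs.length ≠ 4 then false
       else decide (2 ≤ (rs.filter (fun r => r ≠ "A")).length ∧
         (PySem.Set.ofList (rs.filter (fun r => r ≠ "A"))).length = 1)) := by
  match rs with
  | [] => decide
  | [a] => simp
  | [a, b] => simp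
  | [a, b, c] => simp
  | a :: b :: c :: d :: e :: t => simp
  | [a, b, c, d] =>
    have hr : PySem.List.pyRange 1 ((4 : Nat) : Int) 1 = [1, 2, 3] := by decide
    simp only [List.length_cons, List.length_nil, List.find?, List.foldl, List.filter, hr]
    by_cases ha : a = "A" <;> by_cases hb : b = "A" <;> by_cases hc : c = "A" <;>
      by_cases hd : d = "A" <;>
    simp_all [PySem.List.pyGetD, PySem.List.pyGet?, PySem.List.pyIdx?, PySem.Set.ofList,
      PySem.Set.add, PySem.Set.contains] <;>
    (try split_ifs) <;> simp <;>
    (first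
      | omega
      | tauto
      | (subst_vars;
         simp only [List.mem_cons, List.mem_singleton, List.not_mem_nil, or_false] at *;
         subst_vars; tauto))

-- ===== VERDICT (by name: the statement is the Claim_ definition above) =====
theorem check_group3_spec : Claim_equal_check_group3 := by
  intro group _ _
  unfold Spec_check_group3 check_group3 check_group3_alt
  rw [PySem.List.foldl_append_singleton_eq_map]
  have hmap : group.map pvRankA = group.map pvRankB :=
    List.map_congr_left (fun c _ => rank_eq c)
  rw [hmap]
  exact main_eq (group.map pvRankB)
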